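-- pv_equiv track=rewrite | github.com/2015chevaliea2/dac | pre_processing/cleaning.py | remove_dummy_names_from_author
-- ===== SOURCE A (Python) =====
-- def remove_dummy_names_from_author(dummy_names, authors):
--     """
--
--     :param dummy_names:
--     :param authors:
--     :return: a list of names
--     """
--     authors = str(authors).split()
--     for name in dummy_names:
--         if len(authors) <= 1:
--             break
--         else:
--             if name in authors:
--                 authors.remove(name)
--     return authors
-- ===== SOURCE B (Python) =====
-- def remove_dummy_names_from_author(dummy_names, authors):
--     """
--
--     :param dummy_names:
--     :param authors:
--     :return: a list of names
--     """
--     words = str(authors).split()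
--     cnt = {}
--     for w in words:
--         cnt[w] = cnt.get(w, 0) + 1
--     rem = {}
--     remaining = len(words)
--     for name in dummy_names:
--         if remaining <= 1:
--             break
--         if cnt.get(name, 0) > 0:
--             cnt[name] -= 1
--             rem[name] = rem.get(name, 0) + 1
--             remaining -= 1
--     out = []
--     for w in words:
--         r = rem.get(w, 0)
--         if r > 0:
--             rem[w] = r - 1
--         else:
--             out.append(w)
--     return out
-- ===== Notes on version B (the rewrite author's own statement) =====
-- stated objective: alternative
-- what changed: Instead of A's per-dummy-name membership test and in-place remove (each a scan of the author list), B builds a word counter once, runs one pass over dummy_names updating only counts, a pending-removal map and the simulated length, then rebuilds the surviving author list in a single pass.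
import Mathlib
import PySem

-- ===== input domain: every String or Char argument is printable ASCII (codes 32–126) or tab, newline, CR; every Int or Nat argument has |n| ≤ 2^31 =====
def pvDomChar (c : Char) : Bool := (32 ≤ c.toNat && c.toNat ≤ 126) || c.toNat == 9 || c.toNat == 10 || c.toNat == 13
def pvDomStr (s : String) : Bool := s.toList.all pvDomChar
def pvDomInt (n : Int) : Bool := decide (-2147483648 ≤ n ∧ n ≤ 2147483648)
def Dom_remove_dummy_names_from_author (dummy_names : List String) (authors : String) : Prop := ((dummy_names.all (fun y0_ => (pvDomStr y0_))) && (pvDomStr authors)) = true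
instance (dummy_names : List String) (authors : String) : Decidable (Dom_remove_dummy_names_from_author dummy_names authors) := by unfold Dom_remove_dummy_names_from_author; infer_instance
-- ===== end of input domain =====

-- B replaces A's per-dummy-name membership/remove scans of the author list by a
-- word counter, one counting pass over dummy_names and one rebuild pass.


-- ===== PORT A =====
-- the 'for name in dummy_names' loop of A: break on len ≤ 1, else remove first occurrence if present
def pvLoopA : List String → List String → List String
  | [], cur => cur
  | n :: ns, cur =>
    if cur.length ≤ 1 then cur
    else if n ∈ cur then pvLoopA ns ((PySem.List.remove? cur n).getD cur)
    else pvLoopA ns cur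

def remove_dummy_names_from_author (dummy_names : List String) (authors : String) : List String :=
  pvLoopA dummy_names (PySem.Str.split₀ authors)

-- ===== PORT B =====
-- Source B's second loop: decide, per dummy name, whether a removal happens, tracking counts and length
def pvLoopB : List String → PySem.Dict String Int → PySem.Dict String Int → Nat → PySem.Dict String Int
  | [], _, rem, _ => rem
  | n :: ns, cnt, rem, remaining =>
    if remaining ≤ 1 then rem
    else if cnt.getD n 0 > 0 then
      pvLoopB ns (cnt.insert n (cnt.getD n 0 - 1)) (rem.insert n (rem.getD n 0 + 1)) (remaining - 1)
    else pvLoopB ns cnt rem remaining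

-- Source B's third loop: keep each word unless its pending-removal count is positive (then decrement it)
def pvRebuild : List String → PySem.Dict String Int → List String
  | [], _ => []
  | w :: ws, rem =>
    if rem.getD w 0 > 0 then pvRebuild ws (rem.insert w (rem.getD w 0 - 1))
    else w :: pvRebuild ws rem

def remove_dummy_names_from_author_alt (dummy_names : List String) (authors : String) : List String :=
  let words := PySem.Str.split₀ authors
  let cnt := words.foldl (fun d w => d.insert w (d.getD w 0 + 1)) PySem.Dict.empty
  pvRebuild words (pvLoopB dummy_names cnt PySem.Dict.empty words.length)

-- ===== PRECONDITION & SPEC =====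
def Spec_remove_dummy_names_from_author (dummy_names : List String) (authors : String) (out : List String) : Prop := out = remove_dummy_names_from_author_alt dummy_names authors
instance (dummy_names : List String) (authors : String) (out : List String) : Decidable (Spec_remove_dummy_names_from_author dummy_names authors out) := by unfold Spec_remove_dummy_names_from_author; infer_instance

-- ===== CLAIM (what is proved, stated in full; the proofs are below) =====
def Claim_equal_remove_dummy_names_from_author : Prop := ∀ (dummy_names : List String) (authors : String), Dom_remove_dummy_names_from_author dummy_names authors → Spec_remove_dummy_names_from_author dummy_names authors (remove_dummy_names_from_author dummy_names authors)

-- ===== LEMMAS AND PROOFS =====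

-- function-level view of the pending-removal map
def pvUpd (f : String → Int) (w : String) (n : Int) : String → Int := fun x => if x = w then n else f x

def pvRebuildF : List String → (String → Int) → List String
  | [], _ => []
  | w :: ws, f =>
    if f w > 0 then pvRebuildF ws (pvUpd f w (f w - 1))
    else w :: pvRebuildF ws f

lemma pvRebuild_eq_F (ws : List String) : ∀ rem : PySem.Dict String Int,
    pvRebuild ws rem = pvRebuildF ws (fun x => rem.getD x 0) := by
  induction ws with
  | nil => intro rem; rfl
  | cons w ws ih =>
    intro rem
    simp only [pvRebuild, pvRebuildF]
    split
    · rw [ih]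
      congr 1
      funext x
      simp [PySem.Dict.getD_insert, pvUpd]
    · rw [ih]

lemma pvRebuildF_zero (ws : List String) : pvRebuildF ws (fun _ => 0) = ws := by
  induction ws with
  | nil => rfl
  | cons w ws ih => simpa [pvRebuildF] using ih

lemma pvUpd_self (f : String → Int) (n : String) : pvUpd f n (f n) = f := by
  funext x; simp [pvUpd]; intro h; subst h; rfl

lemma pvRebuildF_erase (ws : List String) : ∀ (f : String → Int) (n : String),
    (∀ x, 0 ≤ f x) → n ∈ pvRebuildF ws f →
    (pvRebuildF ws f).erase n = pvRebuildF ws (pvUpd f n (f n + 1)) := by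
  induction ws with
  | nil => intro f n _ h; simp [pvRebuildF] at h
  | cons w ws ih =>
    intro f n hf hmem
    by_cases hwn : w = n
    · subst hwn
      by_cases hw : f w > 0
      · have hw' : pvUpd f w (f w + 1) w > 0 := by simp [pvUpd]; omega
        simp only [pvRebuildF, if_pos hw, if_pos hw']
        have hupd : pvUpd (pvUpd f w (f w + 1)) w (pvUpd f w (f w + 1) w - 1)
            = pvUpd f w (f w) := by
          funext x; by_cases hx : x = w <;> simp [pvUpd, hx]
        rw [hupd, pvUpd_self]
        have hm : w ∈ pvRebuildF ws (pvUpd f w (f w - 1)) := by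
          simpa [pvRebuildF, if_pos hw] using hmem
        have hf' : ∀ x, 0 ≤ pvUpd f w (f w - 1) x := by
          intro x; by_cases hx : x = w <;> simp [pvUpd, hx] <;> [omega; exact hf x]
        rw [ih (pvUpd f w (f w - 1)) w hf' hm]
        congr 1
        funext x; by_cases hx : x = w <;> simp [pvUpd, hx]
      · have hw0 : f w = 0 := le_antisymm (by omega) (hf w)
        have hw' : pvUpd f w (f w + 1) w > 0 := by simp [pvUpd]; omega
        simp only [pvRebuildF, if_neg hw, if_pos hw']
        rw [List.erase_cons_head]
        have hupd : pvUpd (pvUpd f w (f w + 1)) w (pvUpd f w (f w + 1) w - 1) = f := by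
          funext x; by_cases hx : x = w <;> simp [pvUpd, hx, hw0]
        rw [hupd]
    · -- w ≠ n: the head is treated the same on both sides
      have hval : pvUpd f n (f n + 1) w = f w := by simp [pvUpd, hwn]
      by_cases hw : f w > 0
      · have hw' : pvUpd f n (f n + 1) w > 0 := by rw [hval]; exact hw
        simp only [pvRebuildF, if_pos hw, if_pos hw']
        have hm : n ∈ pvRebuildF ws (pvUpd f w (f w - 1)) := by
          simpa [pvRebuildF, if_pos hw] using hmem
        have hf' : ∀ x, 0 ≤ pvUpd f w (f w - 1) x := by
          intro x; by_cases hx : x = w <;> simp [pvUpd, hx] <;> [omega; exact hf x]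
        rw [ih (pvUpd f w (f w - 1)) n hf' hm]
        congr 1
        funext x
        by_cases hx : x = n <;> by_cases hx' : x = w <;> simp_all [pvUpd]
      · have hw' : ¬ pvUpd f n (f n + 1) w > 0 := by rw [hval]; exact hw
        simp only [pvRebuildF, if_neg hw, if_neg hw']
        rw [List.erase_cons_tail (by simp [hwn])]
        have hm : n ∈ pvRebuildF ws f := by
          have h2 := hmem
          simp only [pvRebuildF, if_neg hw, List.mem_cons] at h2
          rcases h2 with h2 | h2
          · exact absurd h2.symm hwn
          · exact h2
        rw [ih f n hf hm]

-- main loop invariant: cnt is the multiset of the current (simulated) author list,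
-- `remaining` its length, rem is a nonnegative removal plan; then B's planned
-- removals match A's actual in-place removals.
lemma pvLoop_key (dn : List String) (ws : List String) :
    ∀ (cnt rem : PySem.Dict String Int) (L : Nat),
    (∀ x, 0 ≤ rem.getD x 0) →
    (∀ w, cnt.getD w 0 = ((pvRebuild ws rem).count w : Int)) →
    L = (pvRebuild ws rem).length →
    pvRebuild ws (pvLoopB dn cnt rem L) = pvLoopA dn (pvRebuild ws rem) := by
  induction dn with
  | nil => intro cnt rem L _ _ _; rfl
  | cons n ns ih =>
    intro cnt rem L hnn hcnt hL
    simp only [pvLoopB, pvLoopA, ← hL]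
    by_cases h1 : L ≤ 1
    · simp [h1]
    · simp only [if_neg h1]
      have hcount : cnt.getD n 0 > 0 ↔ n ∈ pvRebuild ws rem := by
        rw [hcnt n]
        constructor
        · intro h
          have : 0 < (pvRebuild ws rem).count n := by exact_mod_cast h
          exact List.count_pos_iff.mp this
        · intro h
          have : 0 < (pvRebuild ws rem).count n := List.count_pos_iff.mpr h
          exact_mod_cast this
      by_cases hmem : n ∈ pvRebuild ws rem
      · have hc : cnt.getD n 0 > 0 := hcount.mpr hmem
        simp only [if_pos hc, if_pos hmem]
        have herase : (PySem.List.remove? (pvRebuild ws rem) n).getD (pvRebuild ws rem)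
            = (pvRebuild ws rem).erase n := by
          rw [PySem.List.remove?_eq_some_erase (pvRebuild ws rem) n hmem]; rfl
        have hmemF : n ∈ pvRebuildF ws (fun x => rem.getD x 0) := by
          rwa [pvRebuild_eq_F] at hmem
        have hrem' : pvRebuild ws (rem.insert n (rem.getD n 0 + 1))
            = (pvRebuild ws rem).erase n := by
          rw [pvRebuild_eq_F, pvRebuild_eq_F,
              pvRebuildF_erase ws (fun x => rem.getD x 0) n hnn hmemF]
          congr 1
          funext x
          simp [PySem.Dict.getD_insert, pvUpd]
        rw [herase, ← hrem']
        apply ih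
        · intro x
          rw [PySem.Dict.getD_insert]
          by_cases hx : x = n
          · rw [if_pos hx]; have := hnn n; omega
          · rw [if_neg hx]; exact hnn x
        · intro w
          rw [PySem.Dict.getD_insert, hrem']
          have hcpos : 0 < (pvRebuild ws rem).count n := List.count_pos_iff.mpr hmem
          by_cases hwn : w = n
          · subst hwn
            rw [if_pos rfl, hcnt w, List.count_erase_self]
            push_cast [Nat.cast_sub hcpos]
            ring
          · rw [if_neg hwn, hcnt w, List.count_erase_of_ne (fun h => hwn h)]
        · rw [hrem', List.length_erase_of_mem hmem]
          omega
      · have hc : ¬ cnt.getD n 0 > 0 := fun h => hmem (hcount.mp h)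
        simp only [if_neg hc, if_neg hmem]
        exact ih cnt rem L hnn hcnt hL

lemma pvRebuild_empty (ws : List String) : pvRebuild ws (PySem.Dict.empty : PySem.Dict String Int) = ws := by
  rw [pvRebuild_eq_F]
  have h : (fun x => (PySem.Dict.empty : PySem.Dict String Int).getD x 0) = fun _ => (0 : Int) := by
    funext x; rfl
  rw [h, pvRebuildF_zero]

-- ===== VERDICT (by name: the statement is the Claim_ definition above) =====
theorem remove_dummy_names_from_author_spec : Claim_equal_remove_dummy_names_from_author := by
  intro dummy_names authors _
  unfold Spec_remove_dummy_names_from_author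
  have halt : remove_dummy_names_from_author_alt dummy_names authors
      = pvRebuild (PySem.Str.split₀ authors)
          (pvLoopB dummy_names (PySem.Dict.counter (PySem.Str.split₀ authors))
            PySem.Dict.empty (PySem.Str.split₀ authors).length) := rfl
  rw [halt]
  unfold remove_dummy_names_from_author
  rw [pvLoop_key dummy_names (PySem.Str.split₀ authors)
      (PySem.Dict.counter (PySem.Str.split₀ authors)) PySem.Dict.empty
      (PySem.Str.split₀ authors).length
      (fun x => le_refl 0)
      (by intro w; rw [pvRebuild_empty, PySem.Dict.getD_counter])
      (by rw [pvRebuild_empty]),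
    pvRebuild_empty]
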